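-- pv_equiv track=rewrite | github.com/upesacm/21DaysOfCode-2023 | Python/Priyanshi/Day 7 Q3.py | check_triplet_exists
-- ===== SOURCE A (Python) =====
-- def check_triplet_exists(a, b, c):
--     for x in range(1, c + 1):
--         if x % a == 0:
--             for y in range(1, c + 1):
--                 if y % b == 0:
--                     for z in range(1, c + 1):
--                         if z % c == 0 and x + y > z:
--                             return True
--     return False
-- ===== SOURCE B (Python) =====
-- def check_triplet_exists(a, b, c):
--     # z must be c (the only multiple of c in [1, c]); take the largest
--     # multiples of a and b not exceeding c and test their sum against c.
--     if c < 1: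
--         return False
--     if abs(a) > c or abs(b) > c:
--         return False
--     xmax = (c // abs(a)) * abs(a)
--     ymax = (c // abs(b)) * abs(b)
--     return xmax + ymax > c
-- ===== Notes on version B (the rewrite author's own statement) =====
-- stated objective: faster
-- what changed: Replaces the triple nested scan over range(1,c+1) by an O(1) closed form: the only multiple of c in [1,c] is c itself, and a qualifying pair (x,y) exists iff the largest multiples of |a| and |b| not exceeding c sum to more than c.
import Mathlib
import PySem

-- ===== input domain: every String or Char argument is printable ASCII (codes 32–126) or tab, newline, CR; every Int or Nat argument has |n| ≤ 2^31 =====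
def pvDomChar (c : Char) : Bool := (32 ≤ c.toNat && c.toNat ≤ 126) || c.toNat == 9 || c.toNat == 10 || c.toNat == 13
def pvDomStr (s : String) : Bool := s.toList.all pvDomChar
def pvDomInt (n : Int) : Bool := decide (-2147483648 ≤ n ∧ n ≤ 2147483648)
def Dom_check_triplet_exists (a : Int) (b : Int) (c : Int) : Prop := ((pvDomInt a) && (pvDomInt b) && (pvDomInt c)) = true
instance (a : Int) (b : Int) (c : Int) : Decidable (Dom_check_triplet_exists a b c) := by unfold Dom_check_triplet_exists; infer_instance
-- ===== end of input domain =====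

-- B replaces A's O(c^3) triple scan by an O(1) closed form (z must be c; compare
-- the largest multiples of |a| and |b| not exceeding c against c).

-- ===== PORT A =====
-- Python's early 'return True' from the nested loops = List.any over the same ranges.
def check_triplet_exists (a : Int) (b : Int) (c : Int) : Bool :=
  (PySem.List.pyRange 1 (c + 1) 1).any (fun x =>
    (PySem.Int.mod x a == 0) &&
    (PySem.List.pyRange 1 (c + 1) 1).any (fun y =>
      (PySem.Int.mod y b == 0) &&
      (PySem.List.pyRange 1 (c + 1) 1).any (fun z =>
        (PySem.Int.mod z c == 0) && (x + y > z))))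

-- ===== PORT B =====
def check_triplet_exists_alt (a : Int) (b : Int) (c : Int) : Bool :=
  if c < 1 then false
  else if |a| > c || |b| > c then false
  else
    let xmax := PySem.Int.floordiv c |a| * |a|
    let ymax := PySem.Int.floordiv c |b| * |b|
    xmax + ymax > c

-- ===== PRECONDITION & SPEC =====
-- Pre_ excludes exactly the inputs where the Python A raises ZeroDivisionError:
-- c ≥ 1 with a = 0 (x % 0 on the first iteration), or c ≥ 1 with b = 0 reached
-- because some multiple of a lies in [1, c] (i.e. |a| ≤ c).
def Pre_check_triplet_exists (a : Int) (b : Int) (c : Int) : Prop :=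
  c ≤ 0 ∨ (a ≠ 0 ∧ (b ≠ 0 ∨ c < |a|))
instance (a : Int) (b : Int) (c : Int) : Decidable (Pre_check_triplet_exists a b c) := by
  unfold Pre_check_triplet_exists; infer_instance
def pvWitness_check_triplet_exists : Int × Int × Int := (2, 3, 10)

def Spec_check_triplet_exists (a : Int) (b : Int) (c : Int) (out : Bool) : Prop :=
  out = check_triplet_exists_alt a b c
instance (a : Int) (b : Int) (c : Int) (out : Bool) : Decidable (Spec_check_triplet_exists a b c out) := by
  unfold Spec_check_triplet_exists; infer_instance

-- ===== CLAIM (what is proved, stated in full; the proofs are below) =====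
def Claim_equal_check_triplet_exists : Prop := ∀ (a : Int) (b : Int) (c : Int), Dom_check_triplet_exists a b c → Pre_check_triplet_exists a b c → Spec_check_triplet_exists a b c (check_triplet_exists a b c)

-- ===== LEMMAS AND PROOFS =====

-- A in propositional form: some x, y in [1, c] with a ∣ x, b ∣ y and x + y > c
-- (the inner z-loop holds exactly of z = c when 1 ≤ z ≤ c).
lemma portA_iff (a b c : Int) (hc : 1 ≤ c) :
    check_triplet_exists a b c = true ↔
      ∃ x, (1 ≤ x ∧ x ≤ c ∧ a ∣ x) ∧ ∃ y, (1 ≤ y ∧ y ≤ c ∧ b ∣ y) ∧ x + y > c := by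
  simp only [check_triplet_exists, List.any_eq_true, PySem.List.mem_pyRange_one,
    Bool.and_eq_true, beq_iff_eq, PySem.Int.mod_eq_zero_iff_dvd, decide_eq_true_eq]
  constructor
  · rintro ⟨x, hx, hax, y, hy, hby, z, hz, hcz, hgt⟩
    have hzc : z = c := by
      rcases hcz with ⟨k, rfl⟩
      have hk : k = 1 := by nlinarith [hz.1, hz.2]
      simp [hk]
    exact ⟨x, ⟨hx.1, by omega, hax⟩, y, ⟨hy.1, by omega, hby⟩, by omega⟩
  · rintro ⟨x, ⟨hx1, hxc, hax⟩, y, ⟨hy1, hyc, hby⟩, hgt⟩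
    exact ⟨x, ⟨hx1, by omega⟩, hax, y, ⟨hy1, by omega⟩, hby, c, ⟨hc, by omega⟩,
      dvd_refl c, hgt⟩

lemma pyRange_one_c_nil {c : Int} (hc : c < 1) : PySem.List.pyRange 1 (c + 1) 1 = [] := by
  rw [PySem.List.pyRange_of_pos 1 (c + 1) (by norm_num), if_neg (by omega)]
  simp

-- (c / d) * d is the largest multiple of d not exceeding c
lemma max_multiple_le {d c x : Int} (hd : 0 < d) (hx : d ∣ x) (hxc : x ≤ c) :
    x ≤ c / d * d := by
  rcases hx with ⟨k, rfl⟩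
  have hk : k ≤ c / d := by
    rw [Int.le_ediv_iff_mul_le hd]; nlinarith
  nlinarith

theorem check_triplet_exists_spec : Claim_equal_check_triplet_exists := by
  intro a b c _ hpre
  unfold Spec_check_triplet_exists check_triplet_exists_alt
  by_cases hc : c < 1
  · rw [if_pos hc]
    simp [check_triplet_exists, pyRange_one_c_nil hc]
  · rw [if_neg hc]
    push Not at hc
    have ha : a ≠ 0 := by
      rcases hpre with h | ⟨h, _⟩
      · omega
      · exact h
    have habs : 0 < |a| := abs_pos.mpr ha
    by_cases hbig : |a| > c ∨ |b| > c
    · rw [if_pos (by simpa using hbig)]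
      rw [← Bool.not_eq_true, portA_iff a b c hc]
      rintro ⟨x, ⟨hx1, hxc, hax⟩, y, ⟨hy1, hyc, hby⟩, _⟩
      have h1 : |a| ≤ x := Int.le_of_dvd (by omega) ((abs_dvd a x).mpr hax)
      have h2 : |b| ≤ y := Int.le_of_dvd (by omega) ((abs_dvd b y).mpr hby)
      omega
    · push Not at hbig
      have hb : b ≠ 0 := by
        rcases hpre with h | ⟨_, h | h⟩
        · omega
        · exact h
        · omega
      have hbabs : 0 < |b| := abs_pos.mpr hb
      rw [if_neg (by simp; omega)]
      rw [PySem.Int.floordiv_eq_ediv_of_pos habs, PySem.Int.floordiv_eq_ediv_of_pos hbabs]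
      set xmax := c / |a| * |a| with hxm
      set ymax := c / |b| * |b| with hym
      by_cases hgt : xmax + ymax > c
      · rw [decide_eq_true hgt, portA_iff a b c hc]
        have hxm1 : |a| ≤ xmax := by
          have : 1 ≤ c / |a| := by rw [Int.le_ediv_iff_mul_le habs]; omega
          nlinarith
        have hym1 : |b| ≤ ymax := by
          have : 1 ≤ c / |b| := by rw [Int.le_ediv_iff_mul_le hbabs]; omega
          nlinarith
        refine ⟨xmax, ⟨by omega, Int.ediv_mul_le c (ne_of_gt habs), ?_⟩,
                ymax, ⟨by omega, Int.ediv_mul_le c (ne_of_gt hbabs), ?_⟩, hgt⟩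
        · exact (abs_dvd a xmax).mp ⟨c / |a|, by ring⟩
        · exact (abs_dvd b ymax).mp ⟨c / |b|, by ring⟩
      · rw [decide_eq_false hgt, ← Bool.not_eq_true, portA_iff a b c hc]
        rintro ⟨x, ⟨hx1, hxc, hax⟩, y, ⟨hy1, hyc, hby⟩, hsum⟩
        have h1 : x ≤ xmax := max_multiple_le habs ((abs_dvd a x).mpr hax) hxc
        have h2 : y ≤ ymax := max_multiple_le hbabs ((abs_dvd b y).mpr hby) hyc
        omega
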